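-- pv_equiv track=rewrite | github.com/Jazz1996/CS411-project-Fly-at-will | project1_django/FlyAtWill/views.py | SentenceProcess
-- ===== SOURCE A (Python) =====
-- def SentenceProcess(sentence):
--     low_weight = 0.1
--     high_weight = 10
--     background_vocalbulary = ["I", "want", "to", "go", "a", "the", "an", "place", "with", "of", "A", "that", "has", ",",\
--                               "and", "city", "food"]
--     word_list = sentence.split()
--     sen_dict = {}
--     for word in word_list:
--         if word in background_vocalbulary:
--             sen_dict[word] = low_weight
--         else:
--             sen_dict[word] = high_weight
--     output = []
--     for key in sen_dict:
--         if sen_dict[key] != low_weight and len(output) < 5: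
--             output.append(key)
--     return output
-- ===== SOURCE B (Python) =====
-- def SentenceProcess(sentence):
--     background_vocalbulary = {"I", "want", "to", "go", "a", "the", "an", "place", "with", "of", "A", "that", "has", ",",
--                               "and", "city", "food"}
--     seen = set()
--     output = []
--     for word in sentence.split():
--         if word not in background_vocalbulary and word not in seen:
--             seen.add(word)
--             output.append(word)
--             if len(output) == 5:
--                 break
--     return output
-- ===== Notes on version B (the rewrite author's own statement) =====
-- stated objective: simpler
-- what changed: Single pass over the words with a seen-set and early break at 5, instead of building an intermediate word->weight dict and then scanning its keys; the weight table disappears entirely.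
import Mathlib
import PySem

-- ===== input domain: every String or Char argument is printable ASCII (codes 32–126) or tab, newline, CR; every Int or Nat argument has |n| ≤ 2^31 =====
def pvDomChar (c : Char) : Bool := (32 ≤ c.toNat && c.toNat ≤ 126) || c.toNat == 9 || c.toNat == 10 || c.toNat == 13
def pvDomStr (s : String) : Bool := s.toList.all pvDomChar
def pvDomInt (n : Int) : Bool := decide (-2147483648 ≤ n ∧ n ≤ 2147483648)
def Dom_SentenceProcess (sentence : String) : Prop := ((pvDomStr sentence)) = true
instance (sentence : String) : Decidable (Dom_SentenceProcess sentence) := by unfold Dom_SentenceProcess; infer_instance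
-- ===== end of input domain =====

-- B replaces A's two-pass weight-dict construction with a single pass over the words
-- using a seen-set and an early break at 5 unique non-background words (simpler, same result).


-- ===== PORT A =====
def pvBgVocab : List String :=
  ["I", "want", "to", "go", "a", "the", "an", "place", "with", "of", "A", "that", "has", ",",
   "and", "city", "food"]

-- the float weights 0.1 and 10 are only ever stored and compared for (in)equality, never
-- computed with, so representing them exactly as the rationals 1/10 and 10 is exact here
def SentenceProcess (sentence : String) : List String :=
  let wordList := PySem.Str.split₀ sentence
  let senDict : PySem.Dict String ℚ :=
    wordList.foldl (fun d word =>
      if pvBgVocab.contains word then d.insert word (1/10) else d.insert word 10)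
      PySem.Dict.empty
  senDict.keys.foldl (fun output key =>
    if senDict.getD key 0 ≠ (1/10 : ℚ) ∧ output.length < 5 then output ++ [key] else output) []

-- ===== PORT B =====
def pvBgSet : PySem.Set String :=
  PySem.Set.ofList
    ["I", "want", "to", "go", "a", "the", "an", "place", "with", "of", "A", "that", "has", ",",
     "and", "city", "food"]

-- the 'for word in …: if …: …; if len(output) == 5: break' loop of Source B
def SentenceProcessLoop (words : List String) (seen : PySem.Set String)
    (output : List String) : List String :=
  match words with
  | [] => output
  | word :: rest =>
    if ¬ pvBgSet.contains word ∧ ¬ seen.contains word then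
      let output' := output ++ [word]
      if output'.length = 5 then output'
      else SentenceProcessLoop rest (seen.add word) output'
    else SentenceProcessLoop rest seen output

def SentenceProcess_alt (sentence : String) : List String :=
  SentenceProcessLoop (PySem.Str.split₀ sentence) PySem.Set.empty []

-- ===== PRECONDITION & SPEC =====
def Spec_SentenceProcess (sentence : String) (out : List String) : Prop := out = SentenceProcess_alt sentence
instance (sentence : String) (out : List String) : Decidable (Spec_SentenceProcess sentence out) := by unfold Spec_SentenceProcess; infer_instance

-- ===== CLAIM (what is proved, stated in full; the proofs are below) =====
def Claim_equal_SentenceProcess : Prop := ∀ (sentence : String), Dom_SentenceProcess sentence → Spec_SentenceProcess sentence (SentenceProcess sentence)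

-- ===== LEMMAS AND PROOFS =====

-- the value A's dict holds at a key (depends only on the key)
def pvWeight (w : String) : ℚ := if pvBgVocab.contains w then 1/10 else 10

lemma pvDictStep :
    (fun (d : PySem.Dict String ℚ) word =>
      if pvBgVocab.contains word then d.insert word (1/10) else d.insert word 10)
    = fun d word => d.insert word (pvWeight word) := by
  funext d word
  unfold pvWeight
  split <;> rfl

lemma pvDictGetD (l : List String) (d : PySem.Dict String ℚ) (k : String) :
    (l.foldl (fun d word => d.insert word (pvWeight word)) d).getD k 0
      = if k ∈ l then pvWeight k else d.getD k 0 := by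
  induction l generalizing d with
  | nil => simp
  | cons w l ih =>
    simp only [List.foldl_cons, ih, PySem.Dict.getD_insert, List.mem_cons]
    by_cases hk : k ∈ l
    · simp [hk]
    · by_cases hw : k = w <;> simp [hk, hw]

lemma pvDictKeys (l : List String) :
    ((l.foldl (fun d word => d.insert word (pvWeight word)) PySem.Dict.empty)
      : PySem.Dict String ℚ).keys = PySem.Set.ofList l := by
  rw [PySem.Dict.keys_foldl_insert l (fun _ word => pvWeight word)]
  rw [PySem.Dict.keys_empty, PySem.Set.update_nil_left]

-- A's output loop: append-while-short over a list is take of the filter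
lemma pvFoldTake (p : String → Bool) (l out : List String) :
    l.foldl (fun output k => if p k = true ∧ output.length < 5 then output ++ [k] else output) out
      = out ++ (l.filter p).take (5 - out.length) := by
  induction l generalizing out with
  | nil => simp
  | cons w l ih =>
    simp only [List.foldl_cons]
    by_cases hp : p w = true
    · by_cases h5 : out.length < 5
      · rw [if_pos ⟨hp, h5⟩, ih]
        have harith : 5 - out.length = (5 - (out ++ [w]).length) + 1 := by
          simp only [List.length_append, List.length_cons, List.length_nil]; omega
        simp [hp, harith, List.take_succ_cons]
      · rw [if_neg (by tauto), ih]
        have h0 : 5 - out.length = 0 := by omega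
        simp [hp, h0]
    · rw [if_neg (by tauto), ih]
      simp [hp]

lemma pvContainsAdd (s : PySem.Set String) (w y : String) (hw : s.contains w = false) :
    (s.add w).contains y = (s.contains y || y == w) := by
  unfold PySem.Set.add
  rw [hw]
  simp [PySem.Set.contains]
  by_cases h : y = w <;> simp [h]

-- B's loop returns its accumulator plus take-of-filter of the deduplicated remaining words
lemma pvLoopEq (ws : List String) (seen : PySem.Set String) (out : List String)
    (h5 : out.length < 5) :
    SentenceProcessLoop ws seen out
      = out ++ ((PySem.Set.ofList ws).filter
          (fun y => !(pvBgSet.contains y) && !(seen.contains y))).take (5 - out.length) := by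
  induction ws generalizing seen out with
  | nil => simp [SentenceProcessLoop, PySem.Set.ofList_nil]
  | cons w ws ih =>
    rw [PySem.Set.ofList_cons]
    unfold PySem.Set.discard
    by_cases hc : ¬ pvBgSet.contains w ∧ ¬ seen.contains w
    · -- w is appended
      have hsw : seen.contains w = false := by
        cases h : seen.contains w
        · rfl
        · exact absurd h hc.2
      have hbw : pvBgSet.contains w = false := by
        cases h : pvBgSet.contains w
        · rfl
        · exact absurd h hc.1
      have hQw : (!(pvBgSet.contains w) && !(seen.contains w)) = true := by
        rw [hbw, hsw]
        rfl
      rw [SentenceProcessLoop, if_pos hc]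
      simp only []
      rw [List.filter_cons_of_pos (p := fun y => !(pvBgSet.contains y) && !(seen.contains y)) hQw]
      by_cases hlen : (out ++ [w]).length = 5
      · rw [if_pos hlen]
        have h1 : 5 - out.length = 0 + 1 := by
          simp only [List.length_append, List.length_cons, List.length_nil] at hlen ⊢; omega
        rw [h1, List.take_succ_cons, List.take_zero]
      · rw [if_neg hlen]
        have h5' : (out ++ [w]).length < 5 := by
          simp only [List.length_append, List.length_cons, List.length_nil] at *; omega
        rw [ih (seen.add w) (out ++ [w]) h5']
        have hfadd : List.filter (fun y => !(pvBgSet.contains y) && !((seen.add w).contains y))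
              (PySem.Set.ofList ws)
            = List.filter (fun y => !(pvBgSet.contains y) && !(seen.contains y))
                (List.filter (fun y => !(y == w)) (PySem.Set.ofList ws)) := by
          rw [List.filter_filter]
          refine List.filter_congr ?_
          intro y _
          rw [pvContainsAdd seen w y hsw]
          by_cases hyw : y = w
          · subst hyw
            rw [hsw]
            simp
          · simp [Bool.and_assoc]
        rw [hfadd]
        have harith : 5 - out.length = (5 - (out ++ [w]).length) + 1 := by
          simp only [List.length_append, List.length_cons, List.length_nil]; omega
        rw [harith, List.take_succ_cons]
        simp
    · -- w is skipped
      have hQw : (!(pvBgSet.contains w) && !(seen.contains w)) = false := by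
        rcases not_and_or.mp hc with h | h <;> rw [not_not] at h <;> rw [h] <;> simp
      rw [SentenceProcessLoop, if_neg hc, ih seen out h5]
      rw [List.filter_cons_of_neg (p := fun y => !(pvBgSet.contains y) && !(seen.contains y))
        (by simp only []; rw [hQw]; simp), List.filter_filter]
      have hskip : List.filter
            (fun a => (!(pvBgSet.contains a) && !(seen.contains a)) && !(a == w))
            (PySem.Set.ofList ws)
          = List.filter (fun y => !(pvBgSet.contains y) && !(seen.contains y))
              (PySem.Set.ofList ws) := by
        refine List.filter_congr ?_
        intro y _
        by_cases hyw : y = w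
        · subst hyw
          rw [hQw]
          simp
        · simp [hyw]
      rw [hskip]

lemma pvBgSetEq : pvBgSet = pvBgVocab := by decide

-- ===== VERDICT (by name: the statement is the Claim_ definition above) =====
theorem SentenceProcess_spec : Claim_equal_SentenceProcess := by
  intro sentence _
  unfold Spec_SentenceProcess SentenceProcess SentenceProcess_alt
  simp only [pvDictStep]
  set ws := PySem.Str.split₀ sentence with hws
  rw [pvDictKeys ws]
  rw [PySem.List.foldl_congr_mem (PySem.Set.ofList ws) _
    (fun output k => if (!(pvBgVocab.contains k)) = true ∧ output.length < 5
      then output ++ [k] else output) []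
    (by
      intro acc k hk
      simp only []
      have hkw : k ∈ ws := (PySem.Set.mem_ofList ws k).mp hk
      rw [pvDictGetD ws PySem.Dict.empty k, if_pos hkw]
      unfold pvWeight
      by_cases hb : pvBgVocab.contains k = true
      · have hkm : k ∈ pvBgVocab := by simpa using hb
        rw [if_pos hb, if_neg (by simp), if_neg (by simp [hkm])]
      · have hbf : pvBgVocab.contains k = false := by
          cases h : pvBgVocab.contains k
          · rfl
          · exact absurd h hb
        rw [if_neg hb]
        exact if_congr (by rw [hbf]; norm_num) rfl rfl)]
  rw [pvFoldTake (fun k => !(pvBgVocab.contains k)) (PySem.Set.ofList ws) []]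
  rw [pvLoopEq ws PySem.Set.empty [] (by simp)]
  have hfin : (fun y => !(pvBgSet.contains y) && !(PySem.Set.contains PySem.Set.empty y))
      = fun k => !(pvBgVocab.contains k) := by
    funext y
    rw [pvBgSetEq]
    simp [PySem.Set.contains, PySem.Set.empty]
  rw [hfin]
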